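-- pv_equiv track=rewrite | github.com/eernst/dnadis | final_finalizer/utils/reference_utils.py | normalize_ref_lengths
-- ===== SOURCE A (Python) =====
-- from typing import Dict, List, Optional, Set, Tuple
--
-- def normalize_ref_id(ref_id: str) -> str:
--     """Normalize reference IDs to a lowercase 'chr' prefix when present.
--
--     Handles various case patterns: Chr1 -> chr1, CHR1 -> chr1, etc.
--     IDs already starting with lowercase 'chr' are unchanged.
--     """
--     if len(ref_id) >= 3 and ref_id[:3].upper() == "CHR" and not ref_id.startswith("chr"):
--         return "chr" + ref_id[3:]
--     return ref_id
--
-- def normalize_ref_lengths(ref_lengths: Dict[str, int], orig_to_norm: Dict[str, str]) -> Dict[str, int]: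
--     normalized: Dict[str, int] = {}
--     for ref_id, length in ref_lengths.items():
--         norm_id = orig_to_norm.get(ref_id, normalize_ref_id(ref_id))
--         if norm_id not in normalized:
--             normalized[norm_id] = int(length)
--         else:
--             normalized[norm_id] = max(int(length), normalized[norm_id])
--     return normalized
-- ===== SOURCE B (Python) =====
-- def normalize_ref_id(ref_id: str) -> str:
--     if len(ref_id) >= 3 and ref_id[:3].upper() == "CHR" and not ref_id.startswith("chr"):
--         return "chr" + ref_id[3:]
--     return ref_id
--
--
-- def normalize_ref_lengths(ref_lengths, orig_to_norm):
--     # Phase 1: group all lengths by normalized id (first-seen key order preserved).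
--     groups = {}
--     for ref_id, length in ref_lengths.items():
--         norm_id = orig_to_norm.get(ref_id, normalize_ref_id(ref_id))
--         groups.setdefault(norm_id, []).append(int(length))
--     # Phase 2: reduce each group with max.
--     return {norm_id: max(lengths) for norm_id, lengths in groups.items()}
-- ===== Notes on version B (the rewrite author's own statement) =====
-- stated objective: alternative
-- what changed: Replaces A's running-max dict with a membership branch by a two-phase collect-then-reduce: one pass groups all lengths into lists per normalized id, then a dict comprehension takes max of each group.
import Mathlib
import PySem

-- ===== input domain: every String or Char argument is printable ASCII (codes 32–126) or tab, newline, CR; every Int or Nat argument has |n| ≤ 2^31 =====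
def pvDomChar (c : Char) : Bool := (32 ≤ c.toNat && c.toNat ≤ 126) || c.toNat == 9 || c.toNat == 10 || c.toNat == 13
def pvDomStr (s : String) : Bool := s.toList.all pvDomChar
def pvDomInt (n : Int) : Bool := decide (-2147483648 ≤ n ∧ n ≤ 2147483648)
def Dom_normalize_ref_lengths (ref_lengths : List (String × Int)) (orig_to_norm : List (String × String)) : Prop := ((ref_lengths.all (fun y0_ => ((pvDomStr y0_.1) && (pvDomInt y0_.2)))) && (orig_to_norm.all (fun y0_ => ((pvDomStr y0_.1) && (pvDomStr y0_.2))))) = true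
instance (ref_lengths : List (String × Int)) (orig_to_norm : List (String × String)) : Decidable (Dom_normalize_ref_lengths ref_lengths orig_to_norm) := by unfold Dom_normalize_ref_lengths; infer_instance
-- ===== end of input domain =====

-- B replaces A's running-max-with-membership-branch by a collect-then-reduce pass
-- (group lengths into lists per normalized id, then take max of each group); objective: alternative.

-- ===== PORT A =====
-- shared module helper (used verbatim by both A and B)
def normalize_ref_id (ref_id : String) : String :=
  if PySem.Str.len ref_id ≥ 3 ∧ PySem.Str.upper (PySem.Str.slice ref_id none (some 3)) = "CHR"
      ∧ PySem.Str.startswith ref_id "chr" = false then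
    "chr" ++ PySem.Str.slice ref_id (some 3) none
  else
    ref_id

def normalize_ref_lengths (ref_lengths : List (String × Int)) (orig_to_norm : List (String × String)) : List (String × Int) :=
  (ref_lengths.foldl (fun normalized p =>
      if normalized.contains ((PySem.Dict.mk orig_to_norm).getD p.1 (normalize_ref_id p.1)) = false then
        normalized.insert ((PySem.Dict.mk orig_to_norm).getD p.1 (normalize_ref_id p.1)) p.2
      else
        normalized.insert ((PySem.Dict.mk orig_to_norm).getD p.1 (normalize_ref_id p.1))
          (max p.2 (normalized.getD ((PySem.Dict.mk orig_to_norm).getD p.1 (normalize_ref_id p.1)) 0)))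
    PySem.Dict.empty).items

-- ===== PORT B =====
-- max(lengths) on a nonempty list; the [] case is unreachable (Python max would raise there)
def pymax : List Int → Int
  | [] => 0
  | x :: xs => xs.foldl max x

def normalize_ref_lengths_alt (ref_lengths : List (String × Int)) (orig_to_norm : List (String × String)) : List (String × Int) :=
  (ref_lengths.foldl (fun g p =>
      g.modify ((PySem.Dict.mk orig_to_norm).getD p.1 (normalize_ref_id p.1)) [] (· ++ [p.2]))
    PySem.Dict.empty).items.map (fun q => (q.1, pymax q.2))

-- ===== PRECONDITION & SPEC =====
def Spec_normalize_ref_lengths (ref_lengths : List (String × Int)) (orig_to_norm : List (String × String)) (out : List (String × Int)) : Prop := out = normalize_ref_lengths_alt ref_lengths orig_to_norm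
instance (ref_lengths : List (String × Int)) (orig_to_norm : List (String × String)) (out : List (String × Int)) : Decidable (Spec_normalize_ref_lengths ref_lengths orig_to_norm out) := by unfold Spec_normalize_ref_lengths; infer_instance

-- ===== CLAIM (what is proved, stated in full; the proofs are below) =====
def Claim_equal_normalize_ref_lengths : Prop := ∀ (ref_lengths : List (String × Int)) (orig_to_norm : List (String × String)), Dom_normalize_ref_lengths ref_lengths orig_to_norm → Spec_normalize_ref_lengths ref_lengths orig_to_norm (normalize_ref_lengths ref_lengths orig_to_norm)

-- ===== LEMMAS AND PROOFS =====

theorem pymax_append_singleton (v : List Int) (hv : v ≠ []) (x : Int) :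
    pymax (v ++ [x]) = max (pymax v) x := by
  cases v with
  | nil => exact absurd rfl hv
  | cons a as => simp [pymax, List.foldl_append]

theorem get?_mk_map_pymax (items : List (String × List Int)) (k : String) :
    (PySem.Dict.mk (items.map (fun q => (q.1, pymax q.2)))).get? k
      = ((PySem.Dict.mk items).get? k).map pymax := by
  induction items with
  | nil => rfl
  | cons q t iht =>
    obtain ⟨qk, qv⟩ := q
    simp only [List.map_cons, PySem.Dict.get?_mk_cons]
    by_cases hk : (qk == k) = true <;> simp [hk, iht]

-- loop invariant: A's running dict is B's groups dict with every group reduced by pymax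
theorem loop_inv (key : String → String) (l : List (String × Int)) :
    ∀ (dA : PySem.Dict String Int) (dB : PySem.Dict String (List Int)),
      (∀ q ∈ dB.items, q.2 ≠ []) →
      dA.items = dB.items.map (fun q => (q.1, pymax q.2)) →
      (l.foldl (fun normalized p =>
          if normalized.contains (key p.1) = false then
            normalized.insert (key p.1) p.2
          else
            normalized.insert (key p.1) (max p.2 (normalized.getD (key p.1) 0))) dA).items
        = (l.foldl (fun g p => g.modify (key p.1) [] (· ++ [p.2])) dB).items.map
            (fun q => (q.1, pymax q.2)) := by
  induction l with
  | nil => intro dA dB _ h; simpa using h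
  | cons p l ih =>
    intro dA dB hne h
    simp only [List.foldl_cons]
    have hc : dA.contains (key p.1) = dB.contains (key p.1) := by
      simp [PySem.Dict.contains, h, List.any_map, Function.comp_def]
    by_cases hb : dB.contains (key p.1) = true
    · -- key already present: A takes the max, B appends to the group
      obtain ⟨v, hv⟩ : ∃ v, dB.get? (key p.1) = some v := by
        rcases hv : dB.get? (key p.1) with _ | v
        · rw [PySem.Dict.get?_eq_none_iff_contains] at hv; simp [hb] at hv
        · exact ⟨v, rfl⟩
      have hmem : (key p.1, v) ∈ dB.items := PySem.Dict.mem_items_of_get?_eq_some dB hv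
      have hvne : v ≠ [] := hne _ hmem
      have hgA : dA.getD (key p.1) 0 = pymax v := by
        have hA : dA = PySem.Dict.mk (dB.items.map (fun q => (q.1, pymax q.2))) :=
          PySem.Dict.ext h
        rw [hA, PySem.Dict.getD_eq_get?_getD, get?_mk_map_pymax dB.items, hv]; rfl
      have hstepB : dB.modify (key p.1) [] (· ++ [p.2]) = dB.insert (key p.1) (v ++ [p.2]) := by
        simp [PySem.Dict.modify, PySem.Dict.getD_of_get?_eq_some dB [] hv]
      rw [if_neg (by simp [hc, hb]), hgA, hstepB]
      refine ih (dA.insert (key p.1) (max p.2 (pymax v))) (dB.insert (key p.1) (v ++ [p.2])) ?_ ?_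
      · -- every group stays nonempty
        intro q hq
        rw [PySem.Dict.items_insert_of_contains _ _ hb] at hq
        obtain ⟨r, hr, hrq⟩ := List.mem_map.1 hq
        by_cases hk : (r.1 == key p.1) = true
        · simp only [hk, if_true] at hrq; rw [← hrq]; simp
        · simp only [hk, Bool.false_eq_true, if_false] at hrq; exact hrq ▸ hne _ hr
      · -- the two updated states are again related
        rw [PySem.Dict.items_insert_of_contains _ _ (by rw [hc]; exact hb),
            PySem.Dict.items_insert_of_contains _ _ hb, h,
            List.map_map, List.map_map]
        refine List.map_congr_left (fun q _ => ?_)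
        by_cases hk : q.1 = key p.1
        · simp [hk, pymax_append_singleton v hvne, max_comm]
        · simp [hk]
    · -- new key: both append a fresh entry
      have hb' : dB.contains (key p.1) = false := by simpa using hb
      have hstepB : dB.modify (key p.1) [] (· ++ [p.2]) = dB.insert (key p.1) [p.2] := by
        simp [PySem.Dict.modify, PySem.Dict.getD_of_not_contains dB [] hb']
      rw [if_pos (by rw [hc]; exact hb'), hstepB]
      refine ih (dA.insert (key p.1) p.2) (dB.insert (key p.1) [p.2]) ?_ ?_
      · intro q hq
        rw [PySem.Dict.items_insert_of_not_contains _ _ hb'] at hq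
        rcases List.mem_append.1 hq with h1 | h1
        · exact hne _ h1
        · simp at h1; rw [h1]; simp
      · rw [PySem.Dict.items_insert_of_not_contains _ _ (by rw [hc]; exact hb'),
            PySem.Dict.items_insert_of_not_contains _ _ hb', h, List.map_append]
        rfl

-- ===== VERDICT (by name: the statement is the Claim_ definition above) =====
theorem normalize_ref_lengths_spec : Claim_equal_normalize_ref_lengths := by
  intro ref_lengths orig_to_norm _
  unfold Spec_normalize_ref_lengths normalize_ref_lengths normalize_ref_lengths_alt
  exact loop_inv (fun r => (PySem.Dict.mk orig_to_norm).getD r (normalize_ref_id r))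
    ref_lengths PySem.Dict.empty PySem.Dict.empty (by simp [PySem.Dict.empty]) rfl
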